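-- pv_equiv track=rewrite | github.com/chaechae1212/coding-practice | 프로그래머스/0/120880. 특이한 정렬/특이한 정렬.py | solution
-- ===== SOURCE A (Python) =====
-- def solution(numlist, n):
--     numlist=sorted(numlist,reverse=True)
--
--     i=0
--     new_list=[]
--     while len(numlist)!=0:
--         minn = float('inf')
--         remember=0
--         for i in range(len(numlist)):
--             diff = abs(n - numlist[i])
--             if diff < minn or (diff == minn and numlist[i] > numlist[remember]):
--                 minn = diff
--                 remember = i
--
--
--         new_list.append(numlist.pop(remember))
--     return new_list
-- ===== SOURCE B (Python) =====
-- def solution(numlist, n):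
--     return sorted(numlist, key=lambda x: (abs(n - x), -x))
-- ===== Notes on version B (the rewrite author's own statement) =====
-- stated objective: faster
-- what changed: Replaces the selection loop (repeated full-list min scans with pop) by a single sorted() call with the lexicographic key (abs(n-x), -x).
import Mathlib
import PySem

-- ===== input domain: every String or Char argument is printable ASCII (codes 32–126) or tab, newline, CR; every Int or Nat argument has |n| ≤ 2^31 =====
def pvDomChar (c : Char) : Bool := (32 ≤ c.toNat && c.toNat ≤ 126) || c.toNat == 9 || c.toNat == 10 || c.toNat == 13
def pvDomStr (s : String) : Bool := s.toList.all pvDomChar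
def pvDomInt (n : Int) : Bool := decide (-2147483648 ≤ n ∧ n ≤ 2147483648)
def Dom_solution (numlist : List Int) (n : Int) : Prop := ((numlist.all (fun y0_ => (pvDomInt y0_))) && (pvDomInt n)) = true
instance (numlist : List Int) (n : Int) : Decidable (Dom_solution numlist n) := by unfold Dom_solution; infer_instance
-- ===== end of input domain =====

-- B replaces A's quadratic selection loop (rescan for the minimum, pop, append) by a single
-- sorted() call with the lexicographic key (|n-x|, -x); objective: faster. A only reassigns its
-- local name, so the caller's list is not mutated by either version.

-- ===== PORT A =====
-- inner 'for i in range(len(numlist))': state (minn, remember); minn : Option Int models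
-- float('inf') as none (every diff compares below it, exactly as in Python).
-- Indices produced by range(len(l)) are valid, so pyGetD's default 0 is unreachable.
def solInnerStep (n : Int) (l : List Int) (st : Option Int × Int) (i : Int) : Option Int × Int :=
  let diff : Int := |n - PySem.List.pyGetD l i 0|
  let cond : Bool :=
    match st.1 with
    | none => true   -- diff < float('inf')
    | some m => decide (diff < m) || (decide (diff = m) && decide (PySem.List.pyGetD l i 0 > PySem.List.pyGetD l st.2 0))
  if cond then (some diff, i) else st

-- the 'while len(numlist) != 0' loop: scan for the argmin index, pop it, emit the element
def solLoop (n : Int) (l : List Int) : List Int :=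
  if l = [] then []
  else
    let st := (PySem.List.pyRange 0 (PySem.List.len l)).foldl (solInnerStep n l) (none, 0)
    match hp : PySem.List.pop? l st.2 with
    | none => []   -- unreachable: remember is a valid index of the nonempty list
    | some (v, rest) => v :: solLoop n rest
termination_by l.length
decreasing_by
  have := PySem.List.length_of_pop?_eq_some l hp
  simp at this ⊢
  omega

def solution (numlist : List Int) (n : Int) : List Int :=
  solLoop n (PySem.List.sorted numlist (fun x => x) true)

-- ===== PORT B =====
def solution_alt (numlist : List Int) (n : Int) : List Int :=
  PySem.List.sorted2 numlist (fun x => |n - x|) (fun x => -x)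

-- ===== PRECONDITION & SPEC =====
def Spec_solution (numlist : List Int) (n : Int) (out : List Int) : Prop := out = solution_alt numlist n
instance (numlist : List Int) (n : Int) (out : List Int) : Decidable (Spec_solution numlist n out) := by unfold Spec_solution; infer_instance

-- ===== CLAIM (what is proved, stated in full; the proofs are below) =====
def Claim_equal_solution : Prop := ∀ (numlist : List Int) (n : Int), Dom_solution numlist n → Spec_solution numlist n (solution numlist n)

-- ===== LEMMAS AND PROOFS =====

-- the sort key both programs order by: (|n - x|, -x), lexicographically
def keyA (n x : Int) : Lex (Int × Int) := toLex (|n - x|, -x)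

theorem keyA_inj (n : Int) : Function.Injective (keyA n) := by
  intro a b h
  have h2 : ((-a : Int)) = -b := congrArg (fun p => (ofLex p).2) h
  omega

theorem keyA_le_iff {n a b : Int} :
    keyA n a ≤ keyA n b ↔ (|n - a| < |n - b| ∨ (|n - a| = |n - b| ∧ b ≤ a)) := by
  unfold keyA
  rw [Prod.Lex.le_iff]
  simp only [ofLex_toLex]
  constructor
  · rintro (h | ⟨h1, h2⟩)
    · exact Or.inl h
    · exact Or.inr ⟨h1, by omega⟩
  · rintro (h | ⟨h1, h2⟩)
    · exact Or.inl h
    · exact Or.inr ⟨h1, by omega⟩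

theorem keyA_lt_iff {n a b : Int} :
    keyA n a < keyA n b ↔ (|n - a| < |n - b| ∨ (|n - a| = |n - b| ∧ b < a)) := by
  unfold keyA
  rw [Prod.Lex.lt_iff]
  simp only [ofLex_toLex]
  constructor
  · rintro (h | ⟨h1, h2⟩)
    · exact Or.inl h
    · exact Or.inr ⟨h1, by omega⟩
  · rintro (h | ⟨h1, h2⟩)
    · exact Or.inl h
    · exact Or.inr ⟨h1, by omega⟩

-- one step of the inner scan, with the state's minn already some m (rfl: the lets and the match reduce)
theorem solInnerStep_some (n : Int) (l : List Int) (m ri i : Int) :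
    solInnerStep n l (some m, ri) i =
      if (decide (|n - PySem.List.pyGetD l i 0| < m) ||
          (decide (|n - PySem.List.pyGetD l i 0| = m) && decide (PySem.List.pyGetD l i 0 > PySem.List.pyGetD l ri 0))) = true
      then (some |n - PySem.List.pyGetD l i 0|, i) else (some m, ri) := rfl

-- B's sorted2 with keys |n-x| and -x IS sorted with the single lexicographic key keyA n
theorem alt_eq_sorted (numlist : List Int) (n : Int) :
    solution_alt numlist n = PySem.List.sorted numlist (keyA n) := by
  unfold solution_alt PySem.List.sorted2 PySem.List.sorted
  have hb : (fun a b : Int => decide (|n - a| < |n - b|) || (!decide (|n - b| < |n - a|) && decide (-a < -b)))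
      = fun a b : Int => decide (keyA n a < keyA n b) := by
    funext a b
    rw [Bool.eq_iff_iff]
    simp only [Bool.or_eq_true, Bool.and_eq_true, Bool.not_eq_true',
      decide_eq_true_eq, decide_eq_false_iff_not, keyA_lt_iff]
    omega
  simp only [hb]
  simp

-- the inner scan finds an index r < k whose element has minimal key among the first k
theorem innerFold_aux (n : Int) (l : List Int) (k : Nat) (hk1 : 1 ≤ k) (hkl : k ≤ l.length) :
    ∃ r : Nat, r < k ∧
      (PySem.List.pyRange 0 (k : Int)).foldl (solInnerStep n l) (none, 0)
        = (some |n - l.getD r 0|, (r : Int)) ∧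
      ∀ j : Nat, j < k → keyA n (l.getD r 0) ≤ keyA n (l.getD j 0) := by
  induction k with
  | zero => omega
  | succ k ih =>
    by_cases hk0 : k = 0
    · subst hk0
      refine ⟨0, by omega, ?_, ?_⟩
      · show (PySem.List.pyRange 0 1).foldl (solInnerStep n l) (none, 0) = _
        have : PySem.List.pyRange 0 1 = [0] := by decide
        rw [this]
        have h0 : PySem.List.pyGetD l 0 0 = l.getD 0 0 := by
          have := PySem.List.pyGetD_natCast l 0 0
          simpa using this
        simp [solInnerStep, h0, List.getD_eq_getElem?_getD]
      · intro j hj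
        interval_cases j
        exact le_refl _
    · obtain ⟨r, hr, hfold, hmin⟩ := ih (by omega) (by omega)
      have hsplit : PySem.List.pyRange 0 ((k : Int) + 1)
          = PySem.List.pyRange 0 (k : Int) ++ [(k : Int)] :=
        PySem.List.pyRange_one_succ_right (by positivity)
      have hki : ((k + 1 : Nat) : Int) = (k : Int) + 1 := by push_cast; ring
      rw [hki, hsplit, List.foldl_append, hfold]
      have hgr : PySem.List.pyGetD l ((r : Nat) : Int) 0 = l.getD r 0 := PySem.List.pyGetD_natCast l r 0
      have hgk : PySem.List.pyGetD l ((k : Nat) : Int) 0 = l.getD k 0 := PySem.List.pyGetD_natCast l k 0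
      simp only [List.foldl_cons, List.foldl_nil]
      rw [solInnerStep_some, hgk, hgr]
      by_cases hcond : (decide (|n - l.getD k 0| < |n - l.getD r 0|) || (decide (|n - l.getD k 0| = |n - l.getD r 0|) && decide (l.getD k 0 > l.getD r 0))) = true
      · -- update: element k has strictly smaller key
        have hlt : keyA n (l.getD k 0) < keyA n (l.getD r 0) := by
          rw [keyA_lt_iff]
          simp only [Bool.or_eq_true, Bool.and_eq_true, decide_eq_true_eq] at hcond
          omega
        rw [if_pos hcond]
        refine ⟨k, by omega, rfl, ?_⟩
        intro j hj
        by_cases hjk : j = k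
        · subst hjk; exact le_refl _
        · exact le_of_lt (lt_of_lt_of_le hlt (hmin j (by omega)))
      · -- keep: element r still minimal
        have hle : keyA n (l.getD r 0) ≤ keyA n (l.getD k 0) := by
          rw [keyA_le_iff]
          simp only [Bool.or_eq_true, Bool.and_eq_true, decide_eq_true_eq] at hcond
          omega
        rw [if_neg hcond]
        refine ⟨r, by omega, rfl, ?_⟩
        intro j hj
        by_cases hjk : j = k
        · subst hjk; exact hle
        · exact hmin j (by omega)

-- A's loop returns a permutation of its input that is weakly increasing in keyA
theorem solLoop_spec (n : Int) (l : List Int) :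
    (solLoop n l).Perm l ∧ List.Pairwise (fun a b => keyA n a ≤ keyA n b) (solLoop n l) := by
  suffices H : ∀ (N : Nat) (l : List Int), l.length ≤ N →
      (solLoop n l).Perm l ∧ List.Pairwise (fun a b => keyA n a ≤ keyA n b) (solLoop n l) from
    H l.length l le_rfl
  intro N
  induction N with
  | zero =>
    intro l hl
    have : l = [] := List.eq_nil_of_length_eq_zero (by omega)
    subst this
    rw [solLoop]
    simp
  | succ N ih =>
    intro l hl
    by_cases h0 : l = []
    · subst h0; rw [solLoop]; simp
    · have hlen : 1 ≤ l.length := by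
        cases l with
        | nil => exact absurd rfl h0
        | cons x xs => simp
      obtain ⟨r, hr, hfold, hmin⟩ := innerFold_aux n l l.length hlen le_rfl
      have hlenI : PySem.List.len l = (l.length : Int) := by
        simp [PySem.List.len]
      have hpop : PySem.List.pop? l ((r : Nat) : Int)
          = some (l[r]'(by omega), l.eraseIdx r) := PySem.List.pop?_natCast l r (by omega)
      have hget : l.getD r 0 = l[r]'(by omega) := List.getD_eq_getElem l 0 (by omega)
      have hstep : solLoop n l = l[r]'(by omega) :: solLoop n (l.eraseIdx r) := by
        rw [solLoop]
        simp only [h0, if_false]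
        split
        · next heq =>
            simp only [hlenI, hfold] at heq
            rw [hpop] at heq
            exact absurd heq (by simp)
        · next v rest heq =>
            simp only [hlenI, hfold] at heq
            rw [hpop] at heq
            obtain ⟨hv, hrest⟩ : l[r]'(by omega) = v ∧ l.eraseIdx r = rest := by
              simpa using heq
            rw [← hv, ← hrest]
      rw [hstep]
      have herase : (l.eraseIdx r).length ≤ N := by
        have := List.length_eraseIdx_of_lt (l := l) (i := r) (by omega)
        omega
      obtain ⟨ihp, ihs⟩ := ih (l.eraseIdx r) herase
      constructor
      · exact (ihp.cons _).trans (List.getElem_cons_eraseIdx_perm (by omega))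
      · refine List.Pairwise.cons ?_ ihs
        intro y hy
        have hyl : y ∈ l := by
          have : y ∈ l.eraseIdx r := ihp.mem_iff.mp hy
          exact List.mem_of_mem_eraseIdx this
        obtain ⟨j, hj, hjy⟩ := List.mem_iff_getElem.mp hyl
        have := hmin j hj
        rw [List.getD_eq_getElem l 0 hj, hjy, hget] at this
        exact this

-- ===== VERDICT (by name: the statement is the Claim_ definition above) =====
theorem solution_spec : Claim_equal_solution := by
  intro numlist n _
  unfold Spec_solution
  rw [alt_eq_sorted]
  obtain ⟨hperm, hpair⟩ := solLoop_spec n (PySem.List.sorted numlist (fun x => x) true)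
  exact PySem.List.eq_of_perm_of_pairwise_le_of_injective (keyA n) (keyA_inj n)
    (hperm.trans ((PySem.List.sorted_perm numlist (fun x => x) true).trans
      (PySem.List.sorted_perm numlist (keyA n) false).symm))
    hpair (PySem.List.sorted_pairwise numlist (keyA n))
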